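-- pv_equiv track=rewrite | github.com/shreyeshvankina/DSC40B | min_ell_theta.py | minimize_ell_sorted
-- ===== SOURCE A (Python) =====
-- def minimize_ell_sorted(data, colors):
--     n = len(data)
--     total_blue = sum(1 for c in colors if c == 'blue')
--     red_le_theta = 0
--     blue_gt_theta = total_blue
--     best_loss = red_le_theta + blue_gt_theta
--     best_theta = data[0]
--     for i in range(n):
--         x = data[i]
--         c = colors[i]
--         if c == 'red':
--             red_le_theta += 1
--         else:
--             blue_gt_theta -= 1
--         loss = red_le_theta + blue_gt_theta
--         if loss < best_loss:
--             best_loss = loss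
--             best_theta = x
--     return best_theta
-- ===== SOURCE B (Python) =====
-- def minimize_ell_sorted(data, colors):
--     # Right-to-left pass over +/-1 deltas. The loss of threshold data[i] differs
--     # from the baseline loss exactly by the prefix sum of deltas (red=+1, blue/other=-1),
--     # so total_blue never needs to be computed: the earliest minimum of the prefix sums
--     # is maintained by the recurrence "if the best of the suffix is >= 0, start fresh here".
--     m, k = 0, 0
--     for i in range(len(data) - 1, -1, -1):
--         d = 1 if colors[i] == 'red' else -1
--         if m >= 0:
--             m, k = d, i + 1
--         else:
--             m = d + m
--     if m >= 0:
--         return data[0]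
--     return data[k - 1]
-- ===== Notes on version B (the rewrite author's own statement) =====
-- stated objective: alternative
-- what changed: A counts total_blue, then scans left-to-right maintaining running red/blue counts, the current loss and the best (loss, theta) pair; B never computes any loss or total_blue: it maps colors to +/-1 deltas (whose prefix sums the losses differ from only by the constant total_blue) and finds the earliest minimum prefix sum by a single right-to-left pass with the recurrence 'restart here if the best of the suffix is >= 0'.
import Mathlib
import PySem

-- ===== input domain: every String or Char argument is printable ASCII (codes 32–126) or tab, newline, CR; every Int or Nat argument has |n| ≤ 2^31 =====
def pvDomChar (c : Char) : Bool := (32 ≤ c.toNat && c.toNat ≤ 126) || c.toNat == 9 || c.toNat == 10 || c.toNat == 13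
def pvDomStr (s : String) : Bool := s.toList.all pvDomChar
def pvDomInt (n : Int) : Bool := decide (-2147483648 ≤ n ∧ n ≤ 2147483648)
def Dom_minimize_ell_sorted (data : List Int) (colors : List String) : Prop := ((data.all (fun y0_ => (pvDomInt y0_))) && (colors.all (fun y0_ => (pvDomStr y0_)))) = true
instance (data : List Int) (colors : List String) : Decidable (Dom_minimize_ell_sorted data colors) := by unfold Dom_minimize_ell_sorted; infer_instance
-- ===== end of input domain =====

-- B replaces A's left-to-right best-loss scan (which needs total_blue) by a right-to-left
-- pass over ±1 deltas that never computes any loss or total_blue at all (objective: alternative).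

-- ===== PORT A =====
-- one step of A's loop body; state = (red_le_theta, blue_gt_theta, best_loss, best_theta)
def pvAstep (st : Int × Int × Int × Int) (xc : Int × String) : Int × Int × Int × Int :=
  let red := if xc.2 = "red" then st.1 + 1 else st.1
  let blue := if xc.2 = "red" then st.2.1 else st.2.1 - 1
  let loss := red + blue
  if loss < st.2.2.1 then (red, blue, loss, xc.1) else (red, blue, st.2.2.1, st.2.2.2)

def minimize_ell_sorted (data : List Int) (colors : List String) : Int :=
  let total_blue : Int := colors.foldl (fun acc c => if c = "blue" then acc + 1 else acc) 0
  -- 'for i in range(n): x = data[i]; c = colors[i]' ported as a fold over data.zip colors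
  -- (exact under Pre_: data.length ≤ colors.length); 'data[0]' via pyGet? (exact under Pre_: data ≠ [])
  let st := (data.zip colors).foldl pvAstep
      (0, total_blue, 0 + total_blue, (PySem.List.pyGet? data 0).getD 0)
  st.2.2.2

-- ===== PORT B =====
-- Source B's loop 'for i in range(len(data)-1, -1, -1)' reading colors[i] is ported as the
-- structural right-recursion pvBgo over colors.take data.length carrying the 1-based
-- position (exact under Pre_: data.length ≤ colors.length, so each colors[i] is in range);
-- state = (m, k) exactly as in Source B.
-- 'd = 1 if colors[i] == "red" else -1' from Source B
def pvDelta (c : String) : Int := if c = "red" then 1 else -1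

def pvBgo : List String → Nat → Int × Nat
  | [], _ => (0, 0)
  | c :: cs, pos =>
    let st := pvBgo cs (pos + 1)
    let d : Int := pvDelta c
    if 0 ≤ st.1 then (d, pos) else (d + st.1, st.2)

def minimize_ell_sorted_alt (data : List Int) (colors : List String) : Int :=
  let st := pvBgo (colors.take data.length) 1
  if 0 ≤ st.1 then (PySem.List.pyGet? data 0).getD 0
  else (PySem.List.pyGet? data ((st.2 : Int) - 1)).getD 0

-- ===== PRECONDITION & SPEC =====
-- Pre_ excludes exactly the inputs where A raises IndexError: empty data (data[0]) and
-- colors shorter than data (colors[i] out of range).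
def Pre_minimize_ell_sorted (data : List Int) (colors : List String) : Prop :=
  data ≠ [] ∧ data.length ≤ colors.length
instance (data : List Int) (colors : List String) : Decidable (Pre_minimize_ell_sorted data colors) := by
  unfold Pre_minimize_ell_sorted; infer_instance

def pvWitness_minimize_ell_sorted : List Int × List String := ([1, 2, 3], ["red", "blue", "red"])

def Spec_minimize_ell_sorted (data : List Int) (colors : List String) (out : Int) : Prop := out = minimize_ell_sorted_alt data colors
instance (data : List Int) (colors : List String) (out : Int) : Decidable (Spec_minimize_ell_sorted data colors out) := by unfold Spec_minimize_ell_sorted; infer_instance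

-- ===== CLAIM (what is proved, stated in full; the proofs are below) =====
def Claim_equal_minimize_ell_sorted : Prop := ∀ (data : List Int) (colors : List String), Dom_minimize_ell_sorted data colors → Pre_minimize_ell_sorted data colors → Spec_minimize_ell_sorted data colors (minimize_ell_sorted data colors)

-- ===== LEMMAS AND PROOFS =====

-- the loss written at each step of A's loop, annotated with the data value of that step
def pvLossAnn (r b : Int) : List (Int × String) → List (Int × Int)
  | [] => []
  | (x, c) :: ps =>
    let r' := if c = "red" then r + 1 else r
    let b' := if c = "red" then b else b - 1
    (r' + b', x) :: pvLossAnn r' b' ps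

-- A's strict-improvement sweep over the annotated losses
def pvPick (bl bt : Int) : List (Int × Int) → Int
  | [] => bt
  | (l, x) :: ps => if l < bl then pvPick l x ps else pvPick bl bt ps

-- B's argmin readout, phrased on the annotated losses
def pvArg (bl bt : Int) (ps : List (Int × Int)) : Int :=
  let m := (ps.map Prod.fst).foldl min bl
  let k := (PySem.List.index? (bl :: ps.map Prod.fst) m).getD 0
  if k = 0 then bt else (ps.map Prod.snd).getD (k - 1) 0

-- prefix sums of a delta list starting from s
def pvPS (s : Int) : List Int → List Int
  | [] => []
  | d :: ds => (s + d) :: pvPS (s + d) ds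

lemma pvAfold (ps : List (Int × String)) : ∀ (r b bl bt : Int),
    ((ps.foldl pvAstep (r, b, bl, bt)).2.2.2) = pvPick bl bt (pvLossAnn r b ps) := by
  induction ps with
  | nil => intro r b bl bt; simp [pvLossAnn, pvPick]
  | cons p ps ih =>
    intro r b bl bt
    obtain ⟨x, c⟩ := p
    by_cases hc : c = "red"
    · by_cases hl : r + 1 + b < bl <;> simp [pvLossAnn, pvPick, pvAstep, hc, hl, ih]
    · by_cases hl : r + (b - 1) < bl <;> simp [pvLossAnn, pvPick, pvAstep, hc, hl, ih]

lemma pvBridgeSnd (ps : List (Int × String)) : ∀ (r b : Int),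
    (pvLossAnn r b ps).map Prod.snd = ps.map Prod.fst := by
  induction ps with
  | nil => intro r b; simp [pvLossAnn]
  | cons p ps ih => intro r b; obtain ⟨x, c⟩ := p; simp [pvLossAnn, ih]

lemma pvFminLe (xs : List Int) : ∀ (a : Int), xs.foldl min a ≤ a := by
  induction xs with
  | nil => simp
  | cons x t ih => intro a; exact le_trans (ih (min a x)) (min_le_left a x)

lemma pvFminCases (xs : List Int) : ∀ (a : Int), xs.foldl min a = a ∨ xs.foldl min a ∈ xs := by
  induction xs with
  | nil => simp
  | cons x t ih =>
    intro a
    rcases ih (min a x) with h | h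
    · rcases le_or_gt a x with hx | hx
      · left; simpa [min_eq_left hx] using h
      · right; simp only [List.foldl_cons, min_eq_right hx.le] at h ⊢; simp [h]
    · right; simp [List.foldl_cons, h]

lemma pvIndexSome (xs : List Int) (v : Int) (h : v ∈ xs) : ∃ j, PySem.List.index? xs v = some j := by
  rcases Option.isSome_iff_exists.mp ((PySem.List.index?_isSome_iff xs v).mpr h) with ⟨j, hj⟩
  exact ⟨j, hj⟩

lemma pvPickEqArg (ps : List (Int × Int)) : ∀ (bl bt : Int), pvPick bl bt ps = pvArg bl bt ps := by
  induction ps with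
  | nil =>
    intro bl bt
    simp [pvPick, pvArg]
  | cons p ps ih =>
    intro bl bt
    obtain ⟨l, x⟩ := p
    have hfst : ((l, x) :: ps).map Prod.fst = l :: ps.map Prod.fst := by simp
    by_cases hl : l < bl
    · have hm : ((l :: ps.map Prod.fst).foldl min bl) = (ps.map Prod.fst).foldl min l := by
        simp [List.foldl_cons, min_eq_right hl.le]
      have hmle : (ps.map Prod.fst).foldl min l ≤ l := pvFminLe _ l
      have hmlt : (ps.map Prod.fst).foldl min l < bl := lt_of_le_of_lt hmle hl
      have hmem : (ps.map Prod.fst).foldl min l ∈ l :: ps.map Prod.fst := by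
        rcases pvFminCases (ps.map Prod.fst) l with h | h
        · simp [h]
        · simp [h]
      obtain ⟨j, hj⟩ := pvIndexSome _ _ hmem
      have hne : bl ≠ (ps.map Prod.fst).foldl min l := (ne_of_gt hmlt)
      rw [pvPick, if_pos hl, ih l x]
      unfold pvArg
      simp only [hfst, hm]
      rw [PySem.List.index?_cons_of_ne _ hne, hj]
      cases j with
      | zero => simp
      | succ n => simp
    · have hble : bl ≤ l := not_lt.mp hl
      have hm : ((l :: ps.map Prod.fst).foldl min bl) = (ps.map Prod.fst).foldl min bl := by
        simp [List.foldl_cons, min_eq_left hble]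
      rw [pvPick, if_neg hl, ih bl bt]
      by_cases hbl : (ps.map Prod.fst).foldl min bl = bl
      · unfold pvArg
        simp only [hfst, hm, hbl]
        rw [PySem.List.index?_cons_self, PySem.List.index?_cons_self]
        simp
      · have hmle : (ps.map Prod.fst).foldl min bl ≤ bl := pvFminLe _ bl
        have hmlt : (ps.map Prod.fst).foldl min bl < bl := lt_of_le_of_ne hmle hbl
        have hmem : (ps.map Prod.fst).foldl min bl ∈ ps.map Prod.fst := by
          rcases pvFminCases (ps.map Prod.fst) bl with h | h
          · exact absurd h hbl
          · exact h
        obtain ⟨j, hj⟩ := pvIndexSome _ _ hmem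
        have hne1 : bl ≠ (ps.map Prod.fst).foldl min bl := (ne_of_gt hmlt)
        have hne2 : l ≠ (ps.map Prod.fst).foldl min bl := (ne_of_gt (lt_of_lt_of_le hmlt hble))
        unfold pvArg
        simp only [hfst, hm]
        simp only [PySem.List.index?_cons_of_ne _ hne1, PySem.List.index?_cons_of_ne _ hne2, hj]
        simp

lemma pvMapSndZip (data : List Int) (colors : List String) :
    (data.zip colors).map Prod.snd = colors.take data.length := by
  induction data generalizing colors with
  | nil => simp
  | cons x xs ih =>
    cases colors with
    | nil => simp
    | cons c cs => simp [ih]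

lemma pvPS_shift (ds : List Int) : ∀ (a s : Int), pvPS (a + s) ds = (pvPS s ds).map (a + ·) := by
  induction ds with
  | nil => intro a s; simp [pvPS]
  | cons d ds ih =>
    intro a s
    have h : a + s + d = a + (s + d) := by ring
    simp [pvPS, h, ih a (s + d)]

-- the prefix-sum list of a nonempty color list: head delta, then shifted tail
lemma pvPS_zero_cons (c : String) (cs : List String) :
    pvPS 0 (List.map pvDelta (c :: cs)) =
      pvDelta c :: (pvPS 0 (List.map pvDelta cs)).map (pvDelta c + ·) := by
  have hsh := pvPS_shift (List.map pvDelta cs) (pvDelta c) 0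
  simp only [List.map_cons, pvPS, zero_add]
  rw [add_zero] at hsh
  rw [hsh]

lemma pvFminShift (xs : List Int) : ∀ (a b : Int),
    (xs.map (a + ·)).foldl min (a + b) = a + xs.foldl min b := by
  induction xs with
  | nil => intro a b; simp
  | cons x xs ih =>
    intro a b
    have h : min (a + b) (a + x) = a + min b x := by
      rcases le_total b x with h | h
      · rw [min_eq_left h, min_eq_left (by omega)]
      · rw [min_eq_right h, min_eq_right (by omega)]
    simp only [List.map_cons, List.foldl_cons, h, ih]

lemma pvFminComm (xs : List Int) : ∀ (a b : Int),
    min a (xs.foldl min b) = xs.foldl min (min a b) := by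
  induction xs with
  | nil => intro a b; simp
  | cons x xs ih =>
    intro a b
    simp only [List.foldl_cons, ih a (min b x)]
    have : min a (min b x) = min (min a b) x := by
      rcases le_total a b with h | h <;> rcases le_total b x with h' | h' <;> omega
    rw [this]

lemma pvFminZeroHead (t : List Int) (d : Int) :
    (d :: t).foldl min 0 = min 0 ((d :: t).foldl min d) := by
  simp only [List.foldl_cons, min_self]
  rw [pvFminComm t 0 d]

lemma pvMemFoldlMin (t : List Int) (d : Int) : (d :: t).foldl min d ∈ d :: t := by
  simp only [List.foldl_cons, min_self]
  rcases pvFminCases t d with h | h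
  · rw [h]; exact List.mem_cons_self
  · exact List.mem_cons_of_mem _ h

lemma pvIndexMapAdd (xs : List Int) : ∀ (a v : Int),
    PySem.List.index? (xs.map (a + ·)) (a + v) = PySem.List.index? xs v := by
  induction xs with
  | nil => intro a v; simp [PySem.List.index?]
  | cons x xs ih =>
    intro a v
    by_cases hx : x = v
    · subst hx
      rw [List.map_cons, PySem.List.index?_cons_self, PySem.List.index?_cons_self]
    · have hne : a + x ≠ a + v := fun h => hx (by omega)
      rw [List.map_cons, PySem.List.index?_cons_of_ne _ hne,
          PySem.List.index?_cons_of_ne _ hx, ih]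

-- the losses A writes are (r+b)-shifted prefix sums of the ±1 deltas
lemma pvLossAnnFst (ps : List (Int × String)) : ∀ (r b : Int),
    (pvLossAnn r b ps).map Prod.fst = pvPS (r + b) (List.map pvDelta (ps.map Prod.snd)) := by
  induction ps with
  | nil => intro r b; simp [pvLossAnn, pvPS]
  | cons p ps ih =>
    intro r b
    obtain ⟨x, c⟩ := p
    by_cases hc : c = "red"
    · have h1 : r + 1 + b = r + b + 1 := by ring
      simp [pvLossAnn, pvPS, pvDelta, hc, h1, ih (r + 1) b]
    · have h1 : r + (b - 1) = r + b + -1 := by ring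
      simp [pvLossAnn, pvPS, pvDelta, hc, h1, ih r (b - 1)]

-- pvBgo computes the minimum of the nonempty prefix sums and its earliest 1-based position
lemma pvBgoSpec (cs : List String) : ∀ (c : String) (pos : Nat),
    pvBgo (c :: cs) pos =
      ((pvPS 0 (List.map pvDelta (c :: cs))).foldl min (pvDelta c),
       pos + (PySem.List.index? (pvPS 0 (List.map pvDelta (c :: cs)))
               ((pvPS 0 (List.map pvDelta (c :: cs))).foldl min (pvDelta c))).getD 0) := by
  induction cs with
  | nil =>
    intro c pos
    rw [pvPS_zero_cons]
    simp only [pvPS, List.map_nil, List.foldl_cons, List.foldl_nil, min_self]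
    rw [PySem.List.index?_cons_self]
    simp [pvBgo]
  | cons c' cs'' ih =>
    intro c pos
    rw [pvPS_zero_cons]
    have hbgo : pvBgo (c :: c' :: cs'') pos =
        (let st := pvBgo (c' :: cs'') (pos + 1);
         if 0 ≤ st.1 then (pvDelta c, pos) else (pvDelta c + st.1, st.2)) := rfl
    rw [hbgo, ih c' (pos + 1)]
    -- abbreviations
    have hmhead : ∀ (t : List Int) (d : Int), (d :: t).foldl min d = t.foldl min d := by
      intro t d; simp [List.foldl_cons]
    -- the full min is d + min 0 M'
    have hM : (pvDelta c :: (pvPS 0 (List.map pvDelta (c' :: cs''))).map (pvDelta c + ·)).foldl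
        min (pvDelta c)
        = pvDelta c + min 0 ((pvPS 0 (List.map pvDelta (c' :: cs''))).foldl min (pvDelta c')) := by
      rw [hmhead]
      have h2 : ((pvPS 0 (List.map pvDelta (c' :: cs''))).map (pvDelta c + ·)).foldl min (pvDelta c)
          = pvDelta c + (pvPS 0 (List.map pvDelta (c' :: cs''))).foldl min 0 := by
        have := pvFminShift (pvPS 0 (List.map pvDelta (c' :: cs''))) (pvDelta c) 0
        simpa using this
      rw [h2]
      congr 1
      rw [pvPS_zero_cons c' cs'']
      rw [pvFminZeroHead]
    rw [hM]
    by_cases h0M : 0 ≤ (pvPS 0 (List.map pvDelta (c' :: cs''))).foldl min (pvDelta c')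
    · rw [min_eq_left h0M, if_pos h0M]
      have : pvDelta c + 0 = pvDelta c := by ring
      rw [this, PySem.List.index?_cons_self]
      simp
    · have hlt : (pvPS 0 (List.map pvDelta (c' :: cs''))).foldl min (pvDelta c') < 0 :=
        not_le.mp h0M
      rw [min_eq_right hlt.le, if_neg h0M]
      have hmem : (pvPS 0 (List.map pvDelta (c' :: cs''))).foldl min (pvDelta c')
          ∈ pvPS 0 (List.map pvDelta (c' :: cs'')) := by
        rw [pvPS_zero_cons c' cs'']
        exact pvMemFoldlMin _ _
      obtain ⟨j, hj⟩ := pvIndexSome _ _ hmem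
      have hne : pvDelta c
          ≠ pvDelta c + (pvPS 0 (List.map pvDelta (c' :: cs''))).foldl min (pvDelta c') := by
        omega
      rw [PySem.List.index?_cons_of_ne _ hne, pvIndexMapAdd, hj]
      simp only [Option.map_some, Option.getD_some]
      refine Prod.ext rfl ?_
      simp
      omega

-- ===== VERDICT (by name: the statement is the Claim_ definition above) =====
theorem minimize_ell_sorted_spec : Claim_equal_minimize_ell_sorted := by
  intro data colors _ hpre
  obtain ⟨hne, hlen⟩ := hpre
  unfold Spec_minimize_ell_sorted minimize_ell_sorted minimize_ell_sorted_alt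
  simp only []
  set tb : Int := colors.foldl (fun acc c => if c = "blue" then acc + 1 else acc) 0 with htb
  rw [pvAfold, pvPickEqArg]
  have hnlen : 1 ≤ data.length := by
    cases data with
    | nil => exact absurd rfl hne
    | cons _ _ => simp
  obtain ⟨c, rest, htake⟩ : ∃ c rest, colors.take data.length = c :: rest := by
    cases h : colors.take data.length with
    | nil =>
      exfalso
      have h1 : (colors.take data.length).length = 0 := by rw [h]; rfl
      rw [List.length_take] at h1
      omega
    | cons c rest => exact ⟨c, rest, rfl⟩
  -- B's side via the pvBgo spec
  rw [htake, pvBgoSpec rest c 1]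
  -- A's side: losses are tb-shifted prefix sums, values are data
  have hfst : (pvLossAnn 0 tb (data.zip colors)).map Prod.fst
      = (pvPS 0 (List.map pvDelta (c :: rest))).map (tb + ·) := by
    rw [pvLossAnnFst, pvMapSndZip, htake]
    have h1 : (0 : Int) + tb = tb + 0 := by ring
    rw [h1, pvPS_shift]
  have hsnd : (pvLossAnn 0 tb (data.zip colors)).map Prod.snd = data := by
    rw [pvBridgeSnd, List.map_fst_zip hlen]
  unfold pvArg
  simp only [hfst, hsnd]
  -- the running min over the shifted losses
  have hmval : ((pvPS 0 (List.map pvDelta (c :: rest))).map (tb + ·)).foldl min (0 + tb)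
      = tb + min 0 ((pvPS 0 (List.map pvDelta (c :: rest))).foldl min (pvDelta c)) := by
    have h1 : (0 : Int) + tb = tb + 0 := by ring
    rw [h1, pvFminShift]
    congr 1
    rw [pvPS_zero_cons c rest, pvFminZeroHead, ← pvPS_zero_cons c rest]
  rw [hmval]
  have hidx : PySem.List.index?
        ((0 + tb) :: (pvPS 0 (List.map pvDelta (c :: rest))).map (tb + ·))
        (tb + min 0 ((pvPS 0 (List.map pvDelta (c :: rest))).foldl min (pvDelta c)))
      = PySem.List.index? ((0 : Int) :: pvPS 0 (List.map pvDelta (c :: rest)))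
        (min 0 ((pvPS 0 (List.map pvDelta (c :: rest))).foldl min (pvDelta c))) := by
    have hcons : ((0 + tb) :: (pvPS 0 (List.map pvDelta (c :: rest))).map (tb + ·))
        = ((0 : Int) :: pvPS 0 (List.map pvDelta (c :: rest))).map (tb + ·) := by
      simp [add_comm]
    rw [hcons, pvIndexMapAdd]
  rw [hidx]
  by_cases h0M : 0 ≤ (pvPS 0 (List.map pvDelta (c :: rest))).foldl min (pvDelta c)
  · rw [min_eq_left h0M, PySem.List.index?_cons_self]
    simp
    intro hcon
    exfalso
    simp only [List.map_cons] at h0M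
    omega
  · have hlt : (pvPS 0 (List.map pvDelta (c :: rest))).foldl min (pvDelta c) < 0 := not_le.mp h0M
    rw [min_eq_right hlt.le]
    have hne0 : (0 : Int) ≠ (pvPS 0 (List.map pvDelta (c :: rest))).foldl min (pvDelta c) := by omega
    have hmem : (pvPS 0 (List.map pvDelta (c :: rest))).foldl min (pvDelta c)
        ∈ pvPS 0 (List.map pvDelta (c :: rest)) := by
      rw [pvPS_zero_cons c rest]
      exact pvMemFoldlMin _ _
    obtain ⟨j, hj⟩ := pvIndexSome _ _ hmem
    rw [PySem.List.index?_cons_of_ne _ hne0, hj]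
    simp only [Option.map_some, Option.getD_some]
    have hk0 : j + 1 ≠ 0 := by omega
    rw [if_neg hk0, if_neg h0M]
    have hcast : ((1 + j : Nat) : Int) - 1 = ((j : Nat) : Int) := by push_cast; ring
    rw [hcast, PySem.List.pyGet?_natCast, List.getD_eq_getElem?_getD]
    simp
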